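-- pv_equiv track=rewrite | github.com/MeshAdmin/meshadmin-performance-analytics-suite | apps/network-flow-master/flow_forwarder.py | _protocol_matches_filter
-- ===== SOURCE A (Python) =====
-- def _protocol_matches_filter(protocol, filter_value):
--     """
--     Check if a protocol matches a filter value
--
--     Args:
--         protocol (int): Protocol number
--         filter_value (str): Comma-separated list of protocols (numbers or names)
--
--     Returns:
--         bool: True if the protocol matches the filter, False otherwise
--     """
--     # Protocol name to number mapping
--     protocol_map = {
--         'icmp': 1,
--         'tcp': 6,
--         'udp': 17,
--         'gre': 47,
--         'esp': 50,
--         'ah': 51,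
--         'ospf': 89
--     }
--
--     # Split the filter by commas
--     protocol_filters = filter_value.split(',')
--
--     # Convert protocol names to numbers
--     for p_filter in protocol_filters:
--         p_filter = p_filter.strip().lower()
--
--         # If it's a name, convert to number
--         if p_filter in protocol_map:
--             if protocol == protocol_map[p_filter]:
--                 return True
--         else:
--             # Try to convert to int
--             try:
--                 if protocol == int(p_filter):
--                     return True
--             except ValueError:
--                 continue
--
--     return False
-- ===== SOURCE B (Python) =====
-- def _protocol_matches_filter(protocol, filter_value):
--     """Reverse lookup: compute which protocol NAMES denote this number, scan the
--     normalized tokens once for a name hit, then a separate staged pass for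
--     numeric hits; A instead resolves each token to a number inline."""
--     protocol_map = {
--         'icmp': 1,
--         'tcp': 6,
--         'udp': 17,
--         'gre': 47,
--         'esp': 50,
--         'ah': 51,
--         'ospf': 89
--     }
--     tokens = [t.strip().lower() for t in filter_value.split(',')]
--     names = {name for name, num in protocol_map.items() if num == protocol}
--     if any(t in names for t in tokens):
--         return True
--     for t in tokens:
--         try:
--             if int(t) == protocol:
--                 return True
--         except ValueError:
--             continue
--     return False
-- ===== Notes on version B (the rewrite author's own statement) =====
-- stated objective: alternative
-- what changed: A resolves each comma token to a number (name map, else int parse) and compares inline with early return; B inverts the lookup direction: it computes the set of names that denote the given protocol number, checks the normalized tokens against that reverse image, and only then runs a separate numeric-parse pass over the tokens.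
import Mathlib
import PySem

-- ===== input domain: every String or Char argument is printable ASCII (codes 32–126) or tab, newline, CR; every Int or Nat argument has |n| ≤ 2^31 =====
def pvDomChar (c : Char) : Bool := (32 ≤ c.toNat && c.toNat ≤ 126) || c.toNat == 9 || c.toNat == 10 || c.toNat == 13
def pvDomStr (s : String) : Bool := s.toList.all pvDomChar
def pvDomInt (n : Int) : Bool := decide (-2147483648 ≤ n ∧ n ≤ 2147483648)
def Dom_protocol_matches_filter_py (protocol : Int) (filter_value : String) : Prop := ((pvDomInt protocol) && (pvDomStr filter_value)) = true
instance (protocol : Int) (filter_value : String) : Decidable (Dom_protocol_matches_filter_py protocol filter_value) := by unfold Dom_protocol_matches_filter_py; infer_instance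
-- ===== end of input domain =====

-- B inverts the lookup direction: instead of resolving each token to a number inline (A),
-- it computes the set of names denoting the given protocol, scans tokens for a name hit,
-- then runs a separate numeric-parse pass (alternative decomposition; return value only).


-- ===== PORT A =====
-- the protocol_map literal of A
def pvProtoMapA : PySem.Dict String Int :=
  PySem.Dict.ofList [("icmp", 1), ("tcp", 6), ("udp", 17), ("gre", 47), ("esp", 50), ("ah", 51), ("ospf", 89)]

-- A's for-loop with early return True
def pvLoopA (protocol : Int) : List String → Bool
  | [] => false
  | t :: rest =>
    let p := PySem.Str.lower (PySem.Str.strip t)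
    match pvProtoMapA.get? p with
    | some n => if protocol = n then true else pvLoopA protocol rest
    | none =>
      match PySem.Int.ofStr? p with
      | some n => if protocol = n then true else pvLoopA protocol rest
      | none => pvLoopA protocol rest

def protocol_matches_filter_py (protocol : Int) (filter_value : String) : Bool :=
  pvLoopA protocol ((PySem.Str.split? filter_value ",").getD [])

-- ===== PORT B =====
-- the protocol_map literal of B
def pvProtoMapB : PySem.Dict String Int :=
  PySem.Dict.ofList [("icmp", 1), ("tcp", 6), ("udp", 17), ("gre", 47), ("esp", 50), ("ah", 51), ("ospf", 89)]

-- {name for name, num in protocol_map.items() if num == protocol}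
def pvNamesB (protocol : Int) : PySem.Set String :=
  PySem.Set.ofList ((pvProtoMapB.items.filter (fun q => q.2 == protocol)).map (·.1))

def protocol_matches_filter_py_alt (protocol : Int) (filter_value : String) : Bool :=
  let tokens := ((PySem.Str.split? filter_value ",").getD []).map
    (fun t => PySem.Str.lower (PySem.Str.strip t))
  let names := pvNamesB protocol
  if tokens.any (fun t => PySem.Set.contains names t) then true
  else tokens.any (fun t => PySem.Int.ofStr? t == some protocol)

-- ===== PRECONDITION & SPEC =====
def Spec_protocol_matches_filter_py (protocol : Int) (filter_value : String) (out : Bool) : Prop := out = protocol_matches_filter_py_alt protocol filter_value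
instance (protocol : Int) (filter_value : String) (out : Bool) : Decidable (Spec_protocol_matches_filter_py protocol filter_value out) := by unfold Spec_protocol_matches_filter_py; infer_instance

-- ===== CLAIM =====
def Claim_equal_protocol_matches_filter_py : Prop := ∀ (protocol : Int) (filter_value : String), Dom_protocol_matches_filter_py protocol filter_value → Spec_protocol_matches_filter_py protocol filter_value (protocol_matches_filter_py protocol filter_value)

-- ===== LEMMAS AND PROOFS =====
-- A's early-return loop is an 'any' over its per-token test
lemma loopA_eq_any (protocol : Int) (ts : List String) :
    pvLoopA protocol ts = ts.any (fun t =>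
      let p := PySem.Str.lower (PySem.Str.strip t)
      match pvProtoMapA.get? p with
      | some n => decide (protocol = n)
      | none => PySem.Int.ofStr? p == some protocol) := by
  induction ts with
  | nil => simp [pvLoopA]
  | cons t rest ih =>
    simp only [pvLoopA, List.any_cons, ih]
    cases hm : pvProtoMapA.get? (PySem.Str.lower (PySem.Str.strip t)) with
    | some n => by_cases h : protocol = n <;> simp [h]
    | none =>
      cases hi : PySem.Int.ofStr? (PySem.Str.lower (PySem.Str.strip t)) with
      | some n =>
        by_cases h : protocol = n
        · simp [h]
        · have hb : (some n == some protocol) = false :=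
            beq_eq_false_iff_ne.mpr (fun hh => h (Option.some.inj hh).symm)
          simp [h, hb]
      | none => simp

-- A's lookup table, unfolded to a decision chain on the key
lemma getA_chain (p : String) :
    pvProtoMapA.get? p = (if "icmp" = p then some 1 else if "tcp" = p then some 6
      else if "udp" = p then some 17 else if "gre" = p then some 47 else if "esp" = p then some 50
      else if "ah" = p then some 51 else if "ospf" = p then some 89 else none) := by
  have hA : pvProtoMapA = PySem.Dict.mk [("icmp", 1), ("tcp", 6), ("udp", 17), ("gre", 47), ("esp", 50), ("ah", 51), ("ospf", 89)] := by decide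
  by_cases h1 : "icmp" = p
  · subst h1; decide
  by_cases h2 : "tcp" = p
  · subst h2; decide
  by_cases h3 : "udp" = p
  · subst h3; decide
  by_cases h4 : "gre" = p
  · subst h4; decide
  by_cases h5 : "esp" = p
  · subst h5; decide
  by_cases h6 : "ah" = p
  · subst h6; decide
  by_cases h7 : "ospf" = p
  · subst h7; decide
  simp [hA, PySem.Dict.get?, h1, h2, h3, h4, h5, h6, h7]

-- membership in B's reverse image of the protocol number, characterised
lemma mem_namesB (protocol : Int) (p : String) :
    (p ∈ pvNamesB protocol) ↔
      ((p = "icmp" ∧ protocol = 1) ∨ (p = "tcp" ∧ protocol = 6) ∨ (p = "udp" ∧ protocol = 17) ∨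
       (p = "gre" ∧ protocol = 47) ∨ (p = "esp" ∧ protocol = 50) ∨ (p = "ah" ∧ protocol = 51) ∨
       (p = "ospf" ∧ protocol = 89)) := by
  have hitems : pvProtoMapB.items = [("icmp",1),("tcp",6),("udp",17),("gre",47),("esp",50),("ah",51),("ospf",89)] := by decide
  simp [pvNamesB, hitems, PySem.Set.mem_ofList, List.mem_map, List.mem_filter]

-- per-token: A's resolve-and-compare equals (name in reverse image) OR (int-parses to protocol)
lemma perToken (protocol : Int) (p : String) :
    (match pvProtoMapA.get? p with
     | some n => decide (protocol = n)
     | none => PySem.Int.ofStr? p == some protocol)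
    = (PySem.Set.contains (pvNamesB protocol) p || (PySem.Int.ofStr? p == some protocol)) := by
  by_cases h1 : p = "icmp"
  · subst h1
    rw [getA_chain]; by_cases h : protocol = 1 <;>
      simp [h, mem_namesB, show PySem.Int.ofStr? "icmp" = none from rfl]
  by_cases h2 : p = "tcp"
  · subst h2
    rw [getA_chain]; by_cases h : protocol = 6 <;>
      simp [h, mem_namesB, show PySem.Int.ofStr? "tcp" = none from rfl]
  by_cases h3 : p = "udp"
  · subst h3
    rw [getA_chain]; by_cases h : protocol = 17 <;>
      simp [h, mem_namesB, show PySem.Int.ofStr? "udp" = none from rfl]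
  by_cases h4 : p = "gre"
  · subst h4
    rw [getA_chain]; by_cases h : protocol = 47 <;>
      simp [h, mem_namesB, show PySem.Int.ofStr? "gre" = none from rfl]
  by_cases h5 : p = "esp"
  · subst h5
    rw [getA_chain]; by_cases h : protocol = 50 <;>
      simp [h, mem_namesB, show PySem.Int.ofStr? "esp" = none from rfl]
  by_cases h6 : p = "ah"
  · subst h6
    rw [getA_chain]; by_cases h : protocol = 51 <;>
      simp [h, mem_namesB, show PySem.Int.ofStr? "ah" = none from rfl]
  by_cases h7 : p = "ospf"
  · subst h7
    rw [getA_chain]; by_cases h : protocol = 89 <;>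
      simp [h, mem_namesB, show PySem.Int.ofStr? "ospf" = none from rfl]
  have hg : pvProtoMapA.get? p = none := by
    rw [getA_chain]
    simp [Ne.symm h1, Ne.symm h2, Ne.symm h3, Ne.symm h4, Ne.symm h5, Ne.symm h6, Ne.symm h7]
  have hc : PySem.Set.contains (pvNamesB protocol) p = false := by
    simp only [PySem.Set.contains_eq_listContains, List.contains_eq_mem, decide_eq_false_iff_not]
    intro hcon
    rcases (mem_namesB protocol p).mp hcon with ⟨h,_⟩|⟨h,_⟩|⟨h,_⟩|⟨h,_⟩|⟨h,_⟩|⟨h,_⟩|⟨h,_⟩ <;> simp_all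
  rw [hg, hc]
  simp

-- any distributes over || pointwise
lemma any_or_split (ts : List String) (f g : String → Bool) :
    ts.any (fun t => f t || g t) = (ts.any f || ts.any g) := by
  induction ts with
  | nil => simp
  | cons t rest ih =>
    simp only [List.any_cons, ih]
    cases f t <;> cases g t <;> simp

-- ===== VERDICT =====
theorem protocol_matches_filter_py_spec : Claim_equal_protocol_matches_filter_py := by
  intro protocol filter_value _
  unfold Spec_protocol_matches_filter_py protocol_matches_filter_py protocol_matches_filter_py_alt
  rw [loopA_eq_any]
  simp only [List.any_map, Function.comp_def]
  rw [show (fun t =>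
      match pvProtoMapA.get? (PySem.Str.lower (PySem.Str.strip t)) with
      | some n => decide (protocol = n)
      | none => PySem.Int.ofStr? (PySem.Str.lower (PySem.Str.strip t)) == some protocol)
    = (fun t => PySem.Set.contains (pvNamesB protocol) (PySem.Str.lower (PySem.Str.strip t))
        || (PySem.Int.ofStr? (PySem.Str.lower (PySem.Str.strip t)) == some protocol))
    from funext (fun t => perToken protocol (PySem.Str.lower (PySem.Str.strip t)))]
  rw [any_or_split]
  cases h : (((PySem.Str.split? filter_value ",").getD []).any
      (fun t => PySem.Set.contains (pvNamesB protocol) (PySem.Str.lower (PySem.Str.strip t)))) <;> simp
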